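-- pv_equiv track=rewrite | github.com/vimalk78/yaml-bert | yaml_bert/vocab.py | extract_parent_key
-- ===== SOURCE A (Python) =====
-- def extract_parent_key(parent_path: str) -> str:
--     """Extract the last non-numeric component from a parent_path.
--
--     Examples:
--         "spec.template.spec.containers.0" -> "containers"
--         "metadata" -> "metadata"
--         "" -> ""
--     """
--     if not parent_path:
--         return ""
--     parts = parent_path.split(".")
--     for part in reversed(parts):
--         if not part.isdigit():
--             return part
--     return ""
-- ===== SOURCE B (Python) =====
-- def extract_parent_key(parent_path: str) -> str:
--     """Single character-level scan (no split): assemble each dotted component on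
--     the fly with a streaming all-digits flag; a finished non-digit component
--     overwrites `best`."""
--     best = ""
--     cur = ""
--     all_digits = True
--     for ch in parent_path:
--         if ch == '.':
--             if not (cur and all_digits):
--                 best = cur
--             cur = ""
--             all_digits = True
--         else:
--             cur += ch
--             all_digits = all_digits and ch.isdigit()
--     if not (cur and all_digits):
--         best = cur
--     return best
-- ===== Notes on version B (the rewrite author's own statement) =====
-- stated objective: alternative
-- what changed: Eliminates split() entirely: B makes one character-level pass that assembles each dotted component incrementally with a streaming all-digits flag and overwrites the best component when a non-digit one ends, instead of A's split into a parts list and reversed early-return scan.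
import Mathlib
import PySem

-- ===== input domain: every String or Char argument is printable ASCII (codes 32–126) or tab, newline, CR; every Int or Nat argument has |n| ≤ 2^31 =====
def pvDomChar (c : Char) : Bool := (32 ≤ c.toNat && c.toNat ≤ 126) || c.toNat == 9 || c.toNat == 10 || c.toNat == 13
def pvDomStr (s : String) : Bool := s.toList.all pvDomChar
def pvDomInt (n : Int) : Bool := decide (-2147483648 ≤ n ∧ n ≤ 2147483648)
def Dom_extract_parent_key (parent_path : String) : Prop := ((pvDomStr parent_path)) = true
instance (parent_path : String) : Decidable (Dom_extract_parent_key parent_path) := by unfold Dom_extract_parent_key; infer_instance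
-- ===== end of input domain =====

-- B replaces A's split-then-reversed-early-return scan by a single character-level
-- pass that never calls split: it assembles each dotted component on the fly with a
-- streaming all-digits flag and overwrites `best` when a non-digit component ends
-- (objective: alternative decomposition, same cost).


-- ===== PORT A =====
-- the `for part in reversed(parts): if not part.isdigit(): return part` loop
-- (components kept as List Char, the PySem representation of Python strings)
def extract_parent_key_loopA : List (List Char) → List Char
  | [] => []
  | p :: rest => if !PySem.Chars.strIsdigit p then p else extract_parent_key_loopA rest

def extract_parent_key (parent_path : String) : String :=
  if parent_path = "" then ""
  else String.ofList
    (extract_parent_key_loopA (PySem.Chars.splitOn parent_path.toList ['.']).reverse)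

-- ===== PORT B =====
-- the `for ch in parent_path` loop of Source B: state (best, cur, all_digits);
-- `cur and all_digits` is `!cur.isEmpty && alldig`; after the loop the final
-- component is flushed the same way.
def extract_parent_key_altLoop : List Char → List Char → List Char → Bool → List Char
  | [], best, cur, alldig => if !(!cur.isEmpty && alldig) then cur else best
  | c :: rest, best, cur, alldig =>
      if c = '.' then
        extract_parent_key_altLoop rest (if !(!cur.isEmpty && alldig) then cur else best) [] true
      else
        extract_parent_key_altLoop rest best (cur ++ [c]) (alldig && PySem.Chars.isdigit c)

def extract_parent_key_alt (parent_path : String) : String :=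
  String.ofList (extract_parent_key_altLoop parent_path.toList [] [] true)

-- ===== PRECONDITION & SPEC =====
def Spec_extract_parent_key (parent_path : String) (out : String) : Prop := out = extract_parent_key_alt parent_path
instance (parent_path : String) (out : String) : Decidable (Spec_extract_parent_key parent_path out) := by unfold Spec_extract_parent_key; infer_instance

-- ===== CLAIM (what is proved, stated in full; the proofs are below) =====
def Claim_equal_extract_parent_key : Prop := ∀ (parent_path : String), Dom_extract_parent_key parent_path → Spec_extract_parent_key parent_path (extract_parent_key parent_path)

-- ===== LEMMAS AND PROOFS =====
-- a fuel-free characterisation of PySem.Chars.splitOn on the one-char separator '.'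
def pvSplit : List Char → List Char → List (List Char)
  | [], cur => [cur]
  | c :: rest, cur => if c = '.' then cur :: pvSplit rest [] else pvSplit rest (cur ++ [c])

theorem pv_go_eq (fuel : Nat) : ∀ (l cur : List Char) (acc : List (List Char)),
    l.length ≤ fuel →
    PySem.Chars.splitOn.go ['.'] fuel l cur acc = acc.reverse ++ pvSplit l cur.reverse := by
  induction fuel with
  | zero =>
      intro l cur acc h
      have : l = [] := by cases l <;> simp_all
      subst this
      rw [PySem.Chars.splitOn.go.eq_def]
      simp [pvSplit]
  | succ f ih =>
      intro l cur acc h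
      cases l with
      | nil => rw [PySem.Chars.splitOn.go.eq_def]; simp [pvSplit]
      | cons c rest =>
          rw [PySem.Chars.splitOn.go.eq_def]
          simp only [List.length_cons] at h
          split
          next heq => omega
          next => simp_all
          next f' hd tl heqf heql =>
            injection heql with h1 h2
            subst h1; subst h2
            have hf : f' = f := by omega
            subst hf
            by_cases hc : c = '.'
            · subst hc
              rw [if_pos (by simp [List.isPrefixOf])]
              have hd : List.drop (['.'] : List Char).length ('.' :: rest) = rest := by simp
              rw [hd, ih _ _ _ (by omega)]
              simp [pvSplit]
            · rw [if_neg (by simp [List.isPrefixOf]; exact fun h' => hc h'.symm)]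
              rw [ih _ _ _ (by omega)]
              simp [pvSplit, hc]

theorem pv_splitOn (cs : List Char) : PySem.Chars.splitOn cs ['.'] = pvSplit cs [] := by
  unfold PySem.Chars.splitOn
  rw [pv_go_eq _ _ _ _ (by omega)]
  simp

-- B's character loop computes the forward overwrite-fold over the components
theorem pv_altLoop_eq (cs : List Char) : ∀ (best cur : List Char),
    extract_parent_key_altLoop cs best cur (cur.all PySem.Chars.isdigit)
      = (pvSplit cs cur).foldl (fun b p => if !PySem.Chars.strIsdigit p then p else b) best := by
  induction cs with
  | nil =>
      intro best cur
      simp [extract_parent_key_altLoop, pvSplit, PySem.Chars.strIsdigit]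
  | cons c rest ih =>
      intro best cur
      by_cases hc : c = '.'
      · subst hc
        simp only [extract_parent_key_altLoop, pvSplit, if_true]
        have h0 : (true : Bool) = ([] : List Char).all PySem.Chars.isdigit := rfl
        rw [h0, ih]
        simp [PySem.Chars.strIsdigit]
      · simp only [extract_parent_key_altLoop, if_neg hc, pvSplit]
        have h1 : (cur.all PySem.Chars.isdigit && PySem.Chars.isdigit c)
            = (cur ++ [c]).all PySem.Chars.isdigit := by simp
        rw [h1, ih]

-- the forward overwrite-fold equals A's reversed first-match scan
def pvFindAux (l : List (List Char)) (acc : List Char) : List Char :=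
  match l with
  | [] => acc
  | p :: rest => if !PySem.Chars.strIsdigit p then p else pvFindAux rest acc

theorem pvFindAux_append (xs : List (List Char)) (p acc : List Char) :
    pvFindAux (xs ++ [p]) acc
      = pvFindAux xs (if !PySem.Chars.strIsdigit p then p else acc) := by
  induction xs with
  | nil => simp [pvFindAux]
  | cons q qs ih => simp [pvFindAux, ih]

theorem pvFoldl_eq_findAux (l : List (List Char)) (acc : List Char) :
    l.foldl (fun b p => if !PySem.Chars.strIsdigit p then p else b) acc
      = pvFindAux l.reverse acc := by
  induction l generalizing acc with
  | nil => simp [pvFindAux]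
  | cons p rest ih =>
      simp only [List.foldl_cons, List.reverse_cons, pvFindAux_append, ih]

theorem pvFindAux_eq_loopA (l : List (List Char)) :
    pvFindAux l [] = extract_parent_key_loopA l := by
  induction l with
  | nil => rfl
  | cons p rest ih => simp [pvFindAux, extract_parent_key_loopA, ih]

-- ===== VERDICT (by name: the statement is the Claim_ definition above) =====
theorem extract_parent_key_spec : Claim_equal_extract_parent_key := by
  intro s _
  unfold Spec_extract_parent_key extract_parent_key extract_parent_key_alt
  have h0 : (true : Bool) = ([] : List Char).all PySem.Chars.isdigit := rfl
  rw [h0, pv_altLoop_eq, pvFoldl_eq_findAux, pvFindAux_eq_loopA, ← pv_splitOn]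
  split
  · next h => subst h; rfl
  · rfl
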